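-- pv_equiv track=rewrite | github.com/UrwLee/Experience | remodet_repository_LEE/Projects/PyLib/Utils/plot.py | get_plot_struct
-- ===== SOURCE A (Python) =====
-- def get_plot_struct(keys):
--     # 对AP，mAP类型的数据按照键名分组得到struct
--     result = {}
--     for key in keys:
--         key_split = key.split("/")
--         if len(key_split) == 3:
--             key_name = key_split[0] + "+" + key_split[2]
--         else:
--             key_name = key_split[0]
--         if key_name in result:
--             result[key_name].append(key)
--         else:
--             result[key_name] = [key]
--     return result
-- ===== SOURCE B (Python) =====
-- def _plot_name(key):
--     parts = key.split("/")
--     if len(parts) == 3: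
--         return parts[0] + "+" + parts[2]
--     return parts[0]
--
-- def get_plot_struct(keys):
--     # Grouping by repeated scanning: compute the derived names, collect the
--     # distinct names in first-occurrence order with an explicit seen-list,
--     # then assemble each group with its own full filter pass over the keys
--     # (no dict accumulation, no per-key append).
--     names = [_plot_name(k) for k in keys]
--     order = []
--     for n in names:
--         if n not in order:
--             order.append(n)
--     return {n: [k for m, k in zip(names, keys) if m == n] for n in order}
-- ===== Notes on version B (the rewrite author's own statement) =====
-- stated objective: alternative
-- what changed: Replaces A's single-pass hash accumulation (per-key membership test and append into a growing dict) by group-by-filtering: collect the distinct derived names in first-occurrence order, then build each group with a separate full filter scan over the key list (O(n*g) nested scans instead of O(n) hashing).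
import Mathlib
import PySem

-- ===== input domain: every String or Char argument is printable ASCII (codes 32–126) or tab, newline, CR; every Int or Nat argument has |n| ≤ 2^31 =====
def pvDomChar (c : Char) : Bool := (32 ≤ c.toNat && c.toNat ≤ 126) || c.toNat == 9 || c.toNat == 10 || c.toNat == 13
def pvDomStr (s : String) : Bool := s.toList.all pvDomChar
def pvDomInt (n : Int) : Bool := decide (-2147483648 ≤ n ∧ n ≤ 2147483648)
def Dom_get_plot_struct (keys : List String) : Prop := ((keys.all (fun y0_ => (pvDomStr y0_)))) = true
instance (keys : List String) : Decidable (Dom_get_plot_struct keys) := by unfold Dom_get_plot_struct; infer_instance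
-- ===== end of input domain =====

-- B replaces A's single-pass hash accumulation by group-by-filtering: distinct derived
-- names in first-occurrence order, then one full filter scan of the keys per group
-- (alternative decomposition, not claimed faster).

-- ===== PORT A =====
def get_plot_struct (keys : List String) : List (String × List String) :=
  (keys.foldl (fun result key =>
      let key_split := (PySem.Str.split? key "/").getD []
      let key_name :=
        if key_split.length = 3 then
          (PySem.List.pyGet? key_split 0).getD "" ++ "+" ++ (PySem.List.pyGet? key_split 2).getD ""
        else
          (PySem.List.pyGet? key_split 0).getD ""
      if result.contains key_name then
        result.modify key_name [] (fun l => l ++ [key])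
      else
        result.insert key_name [key])
    (PySem.Dict.empty : PySem.Dict String (List String))).items

-- ===== PORT B =====
def plotName (key : String) : String :=
  let parts := (PySem.Str.split? key "/").getD []
  if parts.length = 3 then
    (PySem.List.pyGet? parts 0).getD "" ++ "+" ++ (PySem.List.pyGet? parts 2).getD ""
  else
    (PySem.List.pyGet? parts 0).getD ""

def get_plot_struct_alt (keys : List String) : List (String × List String) :=
  let names := keys.map plotName
  let order := names.foldl (fun acc n => if acc.contains n then acc else acc ++ [n]) ([] : List String)
  order.map (fun n => (n, ((names.zip keys).filter (fun p => p.1 == n)).map (fun p => p.2)))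

-- ===== PRECONDITION & SPEC =====
def Spec_get_plot_struct (keys : List String) (out : List (String × List String)) : Prop := out = get_plot_struct_alt keys
instance (keys : List String) (out : List (String × List String)) : Decidable (Spec_get_plot_struct keys out) := by unfold Spec_get_plot_struct; infer_instance

-- ===== CLAIM (what is proved, stated in full; the proofs are below) =====
def Claim_equal_get_plot_struct : Prop := ∀ (keys : List String), Dom_get_plot_struct keys → Spec_get_plot_struct keys (get_plot_struct keys)

-- ===== LEMMAS AND PROOFS =====

-- A's loop body is an unconditional 'modify with default []'
theorem bodyA_eq_modify (d : PySem.Dict String (List String)) (key : String) :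
    (if d.contains (plotName key) then d.modify (plotName key) [] (fun l => l ++ [key])
     else d.insert (plotName key) [key])
    = d.modify (plotName key) [] (fun l => l ++ [key]) := by
  by_cases h : d.contains (plotName key)
  · simp [h]
  · have hf : d.contains (plotName key) = false := eq_false_of_ne_true h
    simp [hf, PySem.Dict.modify, PySem.Dict.getD_of_not_contains d [] hf]

theorem dictA_eq_foldl_modify (keys : List String) :
    keys.foldl (fun result key =>
        let key_split := (PySem.Str.split? key "/").getD []
        let key_name :=
          if key_split.length = 3 then
            (PySem.List.pyGet? key_split 0).getD "" ++ "+" ++ (PySem.List.pyGet? key_split 2).getD ""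
          else
            (PySem.List.pyGet? key_split 0).getD ""
        if result.contains key_name then
          result.modify key_name [] (fun l => l ++ [key])
        else
          result.insert key_name [key])
      (PySem.Dict.empty : PySem.Dict String (List String))
    = (keys.map (fun k => (plotName k, k))).foldl
        (fun d p => d.modify p.1 [] (fun l => l ++ [p.2]))
        (PySem.Dict.empty : PySem.Dict String (List String)) := by
  rw [List.foldl_map]
  apply PySem.List.foldl_congr_mem
  intro d key _
  simpa [plotName] using bodyA_eq_modify d key

-- B's seen-list loop is exactly PySem.Set.ofList (first occurrences in order)
theorem order_eq_ofList (ns : List String) :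
    ns.foldl (fun acc n => if acc.contains n then acc else acc ++ [n]) ([] : List String)
    = PySem.Set.ofList ns := by
  rw [PySem.Set.ofList_eq_foldl]
  rfl

-- the zipped (name, key) pairs are the per-key pairs A's loop processes
theorem zip_map_self (keys : List String) :
    (keys.map plotName).zip keys = keys.map (fun k => (plotName k, k)) := by
  induction keys with
  | nil => rfl
  | cons k ks ih => simp [ih]

-- ===== VERDICT (by name: the statement is the Claim_ definition above) =====
theorem get_plot_struct_spec : Claim_equal_get_plot_struct := by
  intro keys _
  unfold Spec_get_plot_struct get_plot_struct get_plot_struct_alt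
  rw [dictA_eq_foldl_modify]
  simp only [zip_map_self, order_eq_ofList]
  set l := keys.map (fun k => (plotName k, k)) with hl
  set A := l.foldl (fun d p => d.modify p.1 [] (fun l => l ++ [p.2]))
      (PySem.Dict.empty : PySem.Dict String (List String)) with hA
  have hlfst : l.map Prod.fst = keys.map plotName := by
    simp [hl, List.map_map]
  have hAkeys : A.keys = PySem.Set.ofList (keys.map plotName) := by
    rw [hA, PySem.Dict.keys_foldl_modify_key l Prod.fst [] (fun _ p v => v ++ [p.2])
      PySem.Dict.empty, hlfst]
    simp [PySem.Set.update, PySem.Set.ofList_eq_foldl]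
  have hAnd : A.keys.Nodup := by
    rw [hA]
    exact PySem.Dict.nodup_keys_foldl_modify_key l Prod.fst [] (fun _ p v => v ++ [p.2])
      PySem.Dict.empty (by simp)
  rw [PySem.Dict.items_eq_map_keys A hAnd [], hAkeys]
  apply List.map_congr_left
  intro n _
  have hAget : A.getD n [] = (l.filter (fun p => p.1 == n)).map (fun p => p.2) := by
    rw [hA, PySem.Dict.getD_foldl_modify_append, PySem.Dict.getD_empty, List.nil_append]
  simp [hAget]
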